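-- pv_equiv track=rewrite | github.com/opkwisdom/Algorithm | Greedy/2839.py | sugar_delivery
-- ===== SOURCE A (Python) =====
-- def sugar_delivery(N):
--     if N <= 5:
--         if N == 3 or N == 5:
--             return 1
--         else:
--             return -1
--
--     methods = [-1] * (N+1)
--     methods[3] = methods[5] = 1 # Base case
--
--     for i in range(6, N+1):
--         if methods[i-3] > 0 and methods[i-5] > 0:
--             methods[i] = min(methods[i-3], methods[i-5]) + 1
--         elif methods[i-3] > 0:
--             methods[i] = methods[i-3] + 1
--         elif methods[i-5] > 0:
--             methods[i] = methods[i-5] + 1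
--
--     return methods[N]
-- ===== SOURCE B (Python) =====
-- def sugar_delivery(N):
--     # O(1) closed form: use as many 5kg bags as possible; the remainder mod 5
--     # dictates how many 3kg bags (0,1,2,3 or 4) replace/extend them.
--     if N == 3 or N == 5:
--         return 1
--     if N < 6:
--         return -1
--     r = N % 5
--     if r == 0:
--         return N // 5
--     if r == 3:
--         return (N - 3) // 5 + 1
--     if r == 1:
--         return (N - 6) // 5 + 2
--     if r == 4:
--         return (N - 9) // 5 + 3
--     # r == 2: need four 3kg bags (12); the only N >= 6 with r == 2 below 12 is 7
--     return -1 if N == 7 else (N - 12) // 5 + 4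
-- ===== Notes on version B (the rewrite author's own statement) =====
-- stated objective: faster
-- what changed: Replaced the O(N) dynamic-programming table over all weights up to N by an O(1) closed form on N mod 5 (maximise 5kg bags, the residue fixes the number of 3kg bags).
import Mathlib
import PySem

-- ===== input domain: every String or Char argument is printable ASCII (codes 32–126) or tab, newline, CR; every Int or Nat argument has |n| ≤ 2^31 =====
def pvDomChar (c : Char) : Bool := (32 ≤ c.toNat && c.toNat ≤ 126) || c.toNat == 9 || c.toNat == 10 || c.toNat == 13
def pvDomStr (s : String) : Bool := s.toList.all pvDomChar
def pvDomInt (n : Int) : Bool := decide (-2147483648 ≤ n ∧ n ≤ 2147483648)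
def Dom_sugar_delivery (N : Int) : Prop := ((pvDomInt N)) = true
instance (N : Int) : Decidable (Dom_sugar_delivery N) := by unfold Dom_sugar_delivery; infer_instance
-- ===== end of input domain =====

-- B replaces A's O(N) dynamic-programming table by an O(1) closed form on N mod 5 (faster, asymptotic).


-- ===== PORT A =====
-- methods = [-1] * (N+1); methods[3] = methods[5] = 1   (indices 3, 5 are in range for N >= 6, so pySetD is exact)
def sdInit (N : Int) : List Int :=
  PySem.List.pySetD (PySem.List.pySetD (List.replicate (N+1).toNat (-1)) 3 1) 5 1

-- the body of A's 'for i in range(6, N+1)' loop (the if/elif/elif updating methods[i]);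
-- all indices i, i-3, i-5 lie in [0, N], so pyGetD/pySetD are exact here
def sdStep (m : List Int) (i : Int) : List Int :=
  if 0 < PySem.List.pyGetD m (i-3) 0 ∧ 0 < PySem.List.pyGetD m (i-5) 0 then
    PySem.List.pySetD m i (min (PySem.List.pyGetD m (i-3) 0) (PySem.List.pyGetD m (i-5) 0) + 1)
  else if 0 < PySem.List.pyGetD m (i-3) 0 then
    PySem.List.pySetD m i (PySem.List.pyGetD m (i-3) 0 + 1)
  else if 0 < PySem.List.pyGetD m (i-5) 0 then
    PySem.List.pySetD m i (PySem.List.pyGetD m (i-5) 0 + 1)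
  else m

def sugar_delivery (N : Int) : Int :=
  if N ≤ 5 then
    if N = 3 ∨ N = 5 then 1 else -1
  else
    PySem.List.pyGetD ((PySem.List.pyRange 6 (N+1) 1).foldl sdStep (sdInit N)) N 0

-- ===== PORT B =====
def sugar_delivery_alt (N : Int) : Int :=
  if N = 3 ∨ N = 5 then 1
  else if N < 6 then -1
  else
    let r := PySem.Int.mod N 5
    if r = 0 then PySem.Int.floordiv N 5
    else if r = 3 then PySem.Int.floordiv (N-3) 5 + 1
    else if r = 1 then PySem.Int.floordiv (N-6) 5 + 2
    else if r = 4 then PySem.Int.floordiv (N-9) 5 + 3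
    else if N = 7 then -1 else PySem.Int.floordiv (N-12) 5 + 4

-- ===== PRECONDITION & SPEC =====
def Spec_sugar_delivery (N : Int) (out : Int) : Prop := out = sugar_delivery_alt N
instance (N : Int) (out : Int) : Decidable (Spec_sugar_delivery N out) := by unfold Spec_sugar_delivery; infer_instance

-- ===== CLAIM (what is proved, stated in full; the proofs are below) =====
def Claim_equal_sugar_delivery : Prop := ∀ (N : Int), Dom_sugar_delivery N → Spec_sugar_delivery N (sugar_delivery N)

-- ===== LEMMAS AND PROOFS =====

-- the closed form, written with Lean's ediv/emod (equal to Python's // and % for the positive divisor 5)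
def sdF (j : Int) : Int :=
  if j = 3 ∨ j = 5 then 1
  else if j < 6 then -1
  else if j % 5 = 0 then j / 5
  else if j % 5 = 3 then (j-3)/5 + 1
  else if j % 5 = 1 then (j-6)/5 + 2
  else if j % 5 = 4 then (j-9)/5 + 3
  else if j = 7 then -1 else (j-12)/5 + 4

lemma alt_eq_sdF (N : Int) : sugar_delivery_alt N = sdF N := by
  simp only [sugar_delivery_alt, sdF,
    PySem.Int.floordiv_eq_ediv_of_pos (b := 5) (by norm_num),
    PySem.Int.mod_eq_emod_of_pos (b := 5) (by norm_num)]

lemma sdF_r0 (j : Int) (h6 : 6 ≤ j) (h : j % 5 = 0) : sdF j = j / 5 := by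
  unfold sdF; split_ifs <;> omega

lemma sdF_r1 (j : Int) (h6 : 6 ≤ j) (h : j % 5 = 1) : sdF j = (j-6)/5 + 2 := by
  unfold sdF; split_ifs <;> omega

lemma sdF_r2 (j : Int) (h6 : 6 ≤ j) (h7 : j ≠ 7) (h : j % 5 = 2) : sdF j = (j-12)/5 + 4 := by
  unfold sdF; split_ifs <;> omega

lemma sdF_r3 (j : Int) (h6 : 6 ≤ j) (h : j % 5 = 3) : sdF j = (j-3)/5 + 1 := by
  unfold sdF; split_ifs <;> omega

lemma sdF_r4 (j : Int) (h6 : 6 ≤ j) (h : j % 5 = 4) : sdF j = (j-9)/5 + 3 := by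
  unfold sdF; split_ifs <;> omega

-- the DP recurrence is satisfied by the closed form
lemma sdF_rec (j : Int) (h : 6 ≤ j) :
    sdF j =
      (if 0 < sdF (j-3) ∧ 0 < sdF (j-5) then min (sdF (j-3)) (sdF (j-5)) + 1
       else if 0 < sdF (j-3) then sdF (j-3) + 1
       else if 0 < sdF (j-5) then sdF (j-5) + 1
       else -1) := by
  have h5 : j % 5 = 0 ∨ j % 5 = 1 ∨ j % 5 = 2 ∨ j % 5 = 3 ∨ j % 5 = 4 := by omega
  rcases h5 with h5 | h5 | h5 | h5 | h5
  · rcases (by omega : j = 10 ∨ 15 ≤ j) with rfl | hj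
    · decide
    · rw [sdF_r0 j h h5, sdF_r2 (j-3) (by omega) (by omega) (by omega),
          sdF_r0 (j-5) (by omega) (by omega)]
      split_ifs <;> omega
  · rcases (by omega : j = 6 ∨ 11 ≤ j) with rfl | hj
    · decide
    · rw [sdF_r1 j h h5, sdF_r3 (j-3) (by omega) (by omega),
          sdF_r1 (j-5) (by omega) (by omega)]
      split_ifs <;> omega
  · rcases (by omega : j = 7 ∨ j = 12 ∨ 17 ≤ j) with rfl | rfl | hj
    · decide
    · decide
    · rw [sdF_r2 j h (by omega) h5, sdF_r4 (j-3) (by omega) (by omega),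
          sdF_r2 (j-5) (by omega) (by omega) (by omega)]
      split_ifs <;> omega
  · rcases (by omega : j = 8 ∨ 13 ≤ j) with rfl | hj
    · decide
    · rw [sdF_r3 j h h5, sdF_r0 (j-3) (by omega) (by omega),
          sdF_r3 (j-5) (by omega) (by omega)]
      split_ifs <;> omega
  · rcases (by omega : j = 9 ∨ 14 ≤ j) with rfl | hj
    · decide
    · rw [sdF_r4 j h h5, sdF_r1 (j-3) (by omega) (by omega),
          sdF_r4 (j-5) (by omega) (by omega)]
      split_ifs <;> omega

lemma sdInit_length (N : Int) : (sdInit N).length = (N+1).toNat := by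
  simp [sdInit, PySem.List.length_pySetD]

lemma sdInit_get (N : Int) (hN : 6 ≤ N) (j : Int) (h0 : 0 ≤ j) (hj : j ≤ N) :
    PySem.List.pyGetD (sdInit N) j 0 = if j ≤ 5 then sdF j else -1 := by
  have hlt : j < ((sdInit N).length : Int) := by rw [sdInit_length]; omega
  rw [PySem.List.pyGetD_eq_getElem _ _ h0 hlt]
  simp only [sdInit, PySem.List.pySetD_of_nonneg _ _ (by norm_num : (0:Int) ≤ 3),
    PySem.List.pySetD_of_nonneg _ _ (by norm_num : (0:Int) ≤ 5), List.getElem_set,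
    List.getElem_replicate]
  unfold sdF
  split_ifs <;> omega

-- one loop iteration preserves the table invariant, extending it to i+1
lemma sdStep_spec (N i : Int) (m : List Int) (hN : 6 ≤ N) (hi : 5 ≤ i) (hiN : i + 1 ≤ N)
    (hlen : m.length = (N+1).toNat)
    (hget : ∀ j : Int, 0 ≤ j → j ≤ N → PySem.List.pyGetD m j 0 = if j ≤ i then sdF j else -1) :
    (sdStep m (i+1)).length = (N+1).toNat ∧
    ∀ j : Int, 0 ≤ j → j ≤ N →
      PySem.List.pyGetD (sdStep m (i+1)) j 0 = if j ≤ i+1 then sdF j else -1 := by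
  have hg3 : PySem.List.pyGetD m (i+1-3) 0 = sdF (i-2) := by
    rw [hget (i+1-3) (by omega) (by omega), if_pos (by omega)]; ring_nf
  have hg5 : PySem.List.pyGetD m (i+1-5) 0 = sdF (i-4) := by
    rw [hget (i+1-5) (by omega) (by omega), if_pos (by omega)]; ring_nf
  have hrec := sdF_rec (i+1) (by omega)
  rw [show i+1-3 = i-2 by ring, show i+1-5 = i-4 by ring] at hrec
  have hset : ∀ v : Int,
      (PySem.List.pySetD m (i+1) v).length = (N+1).toNat ∧
      ∀ j : Int, 0 ≤ j → j ≤ N →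
        PySem.List.pyGetD (PySem.List.pySetD m (i+1) v) j 0
          = if j = i+1 then v else PySem.List.pyGetD m j 0 := by
    intro v
    constructor
    · rw [PySem.List.length_pySetD, hlen]
    · intro j h0 hj
      have hlt : j < ((PySem.List.pySetD m (i+1) v).length : Int) := by
        rw [PySem.List.length_pySetD, hlen]; omega
      rw [PySem.List.pyGetD_eq_getElem _ _ h0 hlt]
      have hltm : j < (m.length : Int) := by rw [hlen]; omega
      simp only [PySem.List.pySetD_of_nonneg _ _ (by omega : (0:Int) ≤ i+1), List.getElem_set]
      by_cases hje : j = i+1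
      · rw [if_pos (by omega : (i+1).toNat = j.toNat), if_pos hje]
      · rw [if_neg (by omega : ¬ (i+1).toNat = j.toNat), if_neg hje]
        exact (PySem.List.pyGetD_eq_getElem m 0 h0 hltm).symm
  unfold sdStep
  rw [hg3, hg5]
  split_ifs with h1 h2 h3
  · obtain ⟨hl, hg⟩ := hset (min (sdF (i-2)) (sdF (i-4)) + 1)
    refine ⟨hl, fun j h0 hj => ?_⟩
    rw [hg j h0 hj]
    rw [if_pos h1] at hrec
    by_cases hje : j = i+1
    · rw [if_pos hje, if_pos (by omega), hje, hrec]
    · rw [if_neg hje, hget j h0 hj]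
      by_cases hji : j ≤ i
      · rw [if_pos hji, if_pos (by omega)]
      · rw [if_neg hji, if_neg (by omega)]
  · obtain ⟨hl, hg⟩ := hset (sdF (i-2) + 1)
    refine ⟨hl, fun j h0 hj => ?_⟩
    rw [hg j h0 hj]
    rw [if_neg h1, if_pos h2] at hrec
    by_cases hje : j = i+1
    · rw [if_pos hje, if_pos (by omega), hje, hrec]
    · rw [if_neg hje, hget j h0 hj]
      by_cases hji : j ≤ i
      · rw [if_pos hji, if_pos (by omega)]
      · rw [if_neg hji, if_neg (by omega)]
  · obtain ⟨hl, hg⟩ := hset (sdF (i-4) + 1)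
    refine ⟨hl, fun j h0 hj => ?_⟩
    rw [hg j h0 hj]
    rw [if_neg h1, if_neg h2, if_pos h3] at hrec
    by_cases hje : j = i+1
    · rw [if_pos hje, if_pos (by omega), hje, hrec]
    · rw [if_neg hje, hget j h0 hj]
      by_cases hji : j ≤ i
      · rw [if_pos hji, if_pos (by omega)]
      · rw [if_neg hji, if_neg (by omega)]
  · refine ⟨hlen, fun j h0 hj => ?_⟩
    rw [if_neg h1, if_neg h2, if_neg h3] at hrec
    rw [hget j h0 hj]
    by_cases hje : j = i+1
    · rw [if_neg (by omega), if_pos (by omega), hje, hrec]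
    · by_cases hji : j ≤ i
      · rw [if_pos hji, if_pos (by omega)]
      · rw [if_neg hji, if_neg (by omega)]

-- invariant of A's loop: after processing range(6, i+1) the table holds sdF up to i and -1 above
lemma sd_loop (N : Int) (hN : 6 ≤ N) :
    ∀ i : Int, 5 ≤ i → i ≤ N →
      ((PySem.List.pyRange 6 (i+1) 1).foldl sdStep (sdInit N)).length = (N+1).toNat ∧
      ∀ j : Int, 0 ≤ j → j ≤ N →
        PySem.List.pyGetD ((PySem.List.pyRange 6 (i+1) 1).foldl sdStep (sdInit N)) j 0
          = if j ≤ i then sdF j else -1 := by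
  intro i hi
  induction i, hi using Int.le_induction with
  | base =>
    intro _
    rw [show (5:Int)+1 = 6 by ring, PySem.List.pyRange_one_eq_nil (le_refl 6)]
    exact ⟨sdInit_length N, fun j h0 hj => sdInit_get N hN j h0 hj⟩
  | succ i hi IH =>
    intro hiN
    obtain ⟨hlen, hget⟩ := IH (by omega)
    rw [PySem.List.pyRange_one_succ_right (by omega), List.foldl_append]
    simp only [List.foldl_cons, List.foldl_nil]
    exact sdStep_spec N i _ hN hi hiN hlen hget

-- ===== VERDICT (by name: the statement is the Claim_ definition above) =====
theorem sugar_delivery_spec : Claim_equal_sugar_delivery := by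
  intro N _
  unfold Spec_sugar_delivery
  rw [alt_eq_sdF]
  unfold sugar_delivery
  split_ifs with h hs
  · unfold sdF; rw [if_pos hs]
  · unfold sdF; rw [if_neg hs, if_pos (by omega)]
  · have hN : 6 ≤ N := by omega
    obtain ⟨_, hget⟩ := sd_loop N hN N (by omega) le_rfl
    rw [hget N (by omega) le_rfl, if_pos le_rfl]
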